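-- pv_equiv track=rewrite | github.com/sebastiaanvaneijk/advent-of-code | 2020/problem10.py | ncombinations
-- ===== SOURCE A (Python) =====
-- def ncombinations(n):
--     """
--     Generator to calculate the number of options for a sequence of consecutive integers to be rewritten as
--     a sequence of increasing integers with a maximum step size of three, keeping the first and last integer. I.e.:
--     4, 5, 6, 7 can be rewritten as:
--     4, 5, 7
--     4, 6, 7
--     4, 7
--
--     n: size of sequence, above example has n = 4.
--     """
--     tot = 1
--     i = 1
--     if n <= 2:
--         yield tot
--     while i <= n:
--         if i > 5:
--             tot = tot * 2
--         elif i == 5: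
--             tot = 7
--         elif i == 4:
--             tot = 4
--         elif i == 3:
--             tot = 2
--
--         yield tot
--         i += 1
-- ===== SOURCE B (Python) =====
-- def ncombinations(n):
--     """Generator: i-th combination count by closed form (no running accumulator)."""
--     if n <= 2:
--         yield 1
--     for i in range(1, n + 1):
--         if i < 3:
--             yield 1
--         elif i == 3:
--             yield 2
--         elif i == 4:
--             yield 4
--         else:
--             yield 7 << (i - 5)
-- ===== Notes on version B (the rewrite author's own statement) =====
-- stated objective: alternative
-- what changed: Replaced the mutable running accumulator (doubled/overwritten across iterations) with a stateless per-index closed form: each yielded value is computed independently from its index via a small case split plus a left shift.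
import Mathlib
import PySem

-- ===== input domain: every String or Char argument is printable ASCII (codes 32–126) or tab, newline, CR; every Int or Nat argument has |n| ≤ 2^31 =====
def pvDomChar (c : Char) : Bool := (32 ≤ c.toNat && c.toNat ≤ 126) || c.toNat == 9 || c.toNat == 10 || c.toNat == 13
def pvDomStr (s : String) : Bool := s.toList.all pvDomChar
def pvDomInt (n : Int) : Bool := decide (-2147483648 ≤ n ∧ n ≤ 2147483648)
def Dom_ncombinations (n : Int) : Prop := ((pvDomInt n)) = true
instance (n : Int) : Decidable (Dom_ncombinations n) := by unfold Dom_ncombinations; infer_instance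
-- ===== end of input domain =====

-- B replaces A's running accumulator with an independent per-index closed form; objective: alternative.

-- ===== PORT A =====
-- while-loop of A: fuel counts the remaining iterations (i runs 1..n), tot is the accumulator
def ncombGo : Nat → Int → Int → List Int
  | 0, _, _ => []
  | fuel + 1, i, tot =>
    let tot' := if i > 5 then tot * 2
                else if i = 5 then 7
                else if i = 4 then 4
                else if i = 3 then 2
                else tot
    tot' :: ncombGo fuel (i + 1) tot'

def ncombinations (n : Int) : List Int :=
  (if n ≤ 2 then [1] else []) ++ ncombGo n.toNat 1 1

-- ===== PORT B =====
-- stateless closed form for the i-th value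
def ncombVal (i : Int) : Int :=
  if i < 3 then 1
  else if i = 3 then 2
  else if i = 4 then 4
  else 7 * 2 ^ (i - 5).toNat  -- Python's 7 << (i - 5); exact here since this branch has i ≥ 5

def ncombinations_alt (n : Int) : List Int :=
  (if n ≤ 2 then [1] else []) ++ (PySem.List.pyRange 1 (n + 1) 1).map ncombVal

-- ===== PRECONDITION & SPEC =====
def Spec_ncombinations (n : Int) (out : List Int) : Prop := out = ncombinations_alt n
instance (n : Int) (out : List Int) : Decidable (Spec_ncombinations n out) := by unfold Spec_ncombinations; infer_instance

-- ===== CLAIM (what is proved, stated in full; the proofs are below) =====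
def Claim_equal_ncombinations : Prop := ∀ (n : Int), Dom_ncombinations n → Spec_ncombinations n (ncombinations n)

-- ===== LEMMAS AND PROOFS =====

-- the accumulator entering iteration i is exactly the closed-form value at i-1
lemma ncombVal_step (i : Int) (hi : 1 ≤ i) :
    (if i > 5 then ncombVal (i - 1) * 2
     else if i = 5 then 7
     else if i = 4 then 4
     else if i = 3 then 2
     else ncombVal (i - 1)) = ncombVal i := by
  by_cases h6 : i > 5
  · have h1 : ¬ (i - 1 < 3) := by omega
    have h2 : ¬ (i - 1 = 3) := by omega
    have h3 : ¬ (i - 1 = 4) := by omega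
    have h4 : ¬ (i < 3) := by omega
    have h5 : ¬ (i = 3) := by omega
    have h5' : ¬ (i = 4) := by omega
    simp only [if_pos h6, ncombVal, if_neg h1, if_neg h2, if_neg h3, if_neg h4, if_neg h5,
      if_neg h5']
    have hpow : (i - 5).toNat = (i - 1 - 5).toNat + 1 := by omega
    rw [hpow, pow_succ]; ring
  · by_cases h5 : i = 5
    · subst h5; simp [ncombVal]
    · by_cases h4 : i = 4
      · subst h4; simp [ncombVal]
      · by_cases h3 : i = 3
        · subst h3; simp [ncombVal]
        · have hlt : i < 3 := by omega
          have hlt' : i - 1 < 3 := by omega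
          simp [ncombVal, h6, h5, h4, h3, hlt, hlt']

lemma ncombGo_eq (fuel : Nat) :
    ∀ i : Int, 1 ≤ i →
      ncombGo fuel i (ncombVal (i - 1)) =
        (PySem.List.pyRange i (i + fuel) 1).map ncombVal := by
  induction fuel with
  | zero =>
    intro i hi
    rw [PySem.List.pyRange_one_eq_nil (by omega)]
    simp [ncombGo]
  | succ f ih =>
    intro i hi
    rw [PySem.List.pyRange_one_cons (by omega : i < i + (f + 1 : Nat))]
    simp only [ncombGo, List.map_cons]
    rw [ncombVal_step i hi]
    have htail := ih (i + 1) (by omega)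
    have h1 : i + 1 - 1 = i := by ring
    have h2 : (i + 1) + (f : Int) = i + ((f : Nat) + 1 : Nat) := by push_cast; ring
    rw [h1, h2] at htail
    rw [htail]

theorem ncombinations_spec_aux (n : Int) : ncombinations n = ncombinations_alt n := by
  unfold ncombinations ncombinations_alt
  congr 1
  have h0 : ncombVal (1 - 1) = 1 := by simp [ncombVal]
  have := ncombGo_eq n.toNat 1 (by omega)
  rw [h0] at this
  rw [this]
  by_cases hn : 0 ≤ n
  · have : (1 : Int) + (n.toNat : Int) = n + 1 := by omega
    rw [this]
  · rw [PySem.List.pyRange_one_eq_nil (by omega), PySem.List.pyRange_one_eq_nil (by omega)]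

-- ===== VERDICT (by name: the statement is the Claim_ definition above) =====
theorem ncombinations_spec : Claim_equal_ncombinations := by
  intro n _
  exact ncombinations_spec_aux n
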